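-- pv_equiv track=rewrite | github.com/thekrebso/receiveit-server | main.py | _should_skip_components
-- ===== SOURCE A (Python) =====
-- from typing import Dict, Tuple, List
--
-- def _should_skip_components(components: List[str]) -> bool:
--     if any(c == "System Volume Information" for c in components):
--         return True
--     if any(c.startswith("$") for c in components):
--         return True
--     if any(c in {"$MBR", "$FAT1", "$FAT2", "$OrphanFiles"} for c in components):
--         return True
--     if any(
--         c in {
--             ".DS_Store",
--             ".Spotlight-V100",
--             ".fseventsd",
--             ".Trashes",
--             ".TemporaryItems",
--             ".AppleDouble",
--             ".VolumeIcon.icns",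
--         }
--         for c in components
--     ):
--         return True
--     if any(c.startswith("._") for c in components):
--         return True
--     return False
-- ===== SOURCE B (Python) =====
-- _MAC_JUNK = {
--     ".DS_Store",
--     ".Spotlight-V100",
--     ".fseventsd",
--     ".Trashes",
--     ".TemporaryItems",
--     ".AppleDouble",
--     ".VolumeIcon.icns",
-- }
--
-- def _is_skippable(c):
--     return (
--         c == "System Volume Information"
--         or c.startswith("$")
--         or c in _MAC_JUNK
--         or c.startswith("._")
--     )
--
-- def _should_skip_components(components):
--     for c in components:
--         if _is_skippable(c):
--             return True
--     return False
-- ===== Notes on version B (the rewrite author's own statement) =====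
-- stated objective: simpler
-- what changed: Replaces A's five separate any() scans over the list with a single short-circuiting pass applying one combined predicate per component (the $-names set is subsumed by startswith('$')).
import Mathlib
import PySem

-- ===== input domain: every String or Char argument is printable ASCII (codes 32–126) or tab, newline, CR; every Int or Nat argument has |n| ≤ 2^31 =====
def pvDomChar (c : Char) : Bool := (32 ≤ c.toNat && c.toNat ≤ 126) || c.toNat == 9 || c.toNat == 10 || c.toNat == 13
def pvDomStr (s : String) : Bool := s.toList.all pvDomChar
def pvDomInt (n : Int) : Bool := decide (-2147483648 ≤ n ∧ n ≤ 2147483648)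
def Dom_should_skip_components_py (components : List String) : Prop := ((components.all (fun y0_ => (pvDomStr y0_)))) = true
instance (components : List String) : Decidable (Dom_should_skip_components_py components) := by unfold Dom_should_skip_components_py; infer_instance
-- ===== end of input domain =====

-- B replaces A's five separate any() scans with one short-circuiting pass using a single combined predicate; objective: simpler.

-- ===== PORT A =====
-- five sequential any() scans, in A's order
def should_skip_components_py (components : List String) : Bool :=
  if components.any (fun c => c == "System Volume Information") then true
  else if components.any (fun c => PySem.Str.startswith c "$") then true
  else if components.any (fun c => c == "$MBR" || c == "$FAT1" || c == "$FAT2" || c == "$OrphanFiles") then true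
  else if components.any (fun c =>
      c == ".DS_Store" || c == ".Spotlight-V100" || c == ".fseventsd" || c == ".Trashes" ||
      c == ".TemporaryItems" || c == ".AppleDouble" || c == ".VolumeIcon.icns") then true
  else if components.any (fun c => PySem.Str.startswith c "._") then true
  else false

-- ===== PORT B =====
def isSkippable (c : String) : Bool :=
  c == "System Volume Information"
  || PySem.Str.startswith c "$"
  || (c == ".DS_Store" || c == ".Spotlight-V100" || c == ".fseventsd" || c == ".Trashes" ||
      c == ".TemporaryItems" || c == ".AppleDouble" || c == ".VolumeIcon.icns")
  || PySem.Str.startswith c "._"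

-- single loop over the components, short-circuiting on the first skippable one
def should_skip_components_py_alt : List String → Bool
  | [] => false
  | c :: rest => if isSkippable c then true else should_skip_components_py_alt rest

-- ===== PRECONDITION & SPEC =====
def Spec_should_skip_components_py (components : List String) (out : Bool) : Prop := out = should_skip_components_py_alt components
instance (components : List String) (out : Bool) : Decidable (Spec_should_skip_components_py components out) := by unfold Spec_should_skip_components_py; infer_instance

-- ===== CLAIM (what is proved, stated in full; the proofs are below) =====
def Claim_equal_should_skip_components_py : Prop := ∀ (components : List String), Dom_should_skip_components_py components → Spec_should_skip_components_py components (should_skip_components_py components)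

-- ===== LEMMAS AND PROOFS =====

-- B's loop is List.any of the combined predicate
lemma alt_eq_any (l : List String) : should_skip_components_py_alt l = l.any isSkippable := by
  induction l with
  | nil => rfl
  | cons c rest ih =>
    simp only [should_skip_components_py_alt, List.any_cons, ih]
    by_cases h : isSkippable c = true <;> simp [h]

-- a component matching A's $-names set also matches startswith "$"
lemma dollar_subsumed (c : String) :
    (c == "$MBR" || c == "$FAT1" || c == "$FAT2" || c == "$OrphanFiles") = true →
    PySem.Str.startswith c "$" = true := by
  intro h
  simp only [Bool.or_eq_true, beq_iff_eq] at h
  rcases h with ((h | h) | h) | h <;> subst h <;> decide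

-- the combined predicate is the or of A's five predicates
lemma isSkippable_eq (c : String) :
    isSkippable c =
      ((c == "System Volume Information")
       || PySem.Str.startswith c "$"
       || (c == "$MBR" || c == "$FAT1" || c == "$FAT2" || c == "$OrphanFiles")
       || (c == ".DS_Store" || c == ".Spotlight-V100" || c == ".fseventsd" || c == ".Trashes" ||
           c == ".TemporaryItems" || c == ".AppleDouble" || c == ".VolumeIcon.icns")
       || PySem.Str.startswith c "._") := by
  unfold isSkippable
  by_cases h : (c == "$MBR" || c == "$FAT1" || c == "$FAT2" || c == "$OrphanFiles") = true
  · have hs := dollar_subsumed c h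
    simp only [hs, Bool.true_or, Bool.or_true]
  · simp only [Bool.not_eq_true] at h
    simp [h]

-- ===== VERDICT (by name: the statement is the Claim_ definition above) =====
theorem should_skip_components_py_spec : Claim_equal_should_skip_components_py := by
  intro components _
  unfold Spec_should_skip_components_py
  rw [alt_eq_any]
  unfold should_skip_components_py
  rw [show isSkippable = (fun c =>
      ((c == "System Volume Information")
       || PySem.Str.startswith c "$"
       || (c == "$MBR" || c == "$FAT1" || c == "$FAT2" || c == "$OrphanFiles")
       || (c == ".DS_Store" || c == ".Spotlight-V100" || c == ".fseventsd" || c == ".Trashes" ||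
           c == ".TemporaryItems" || c == ".AppleDouble" || c == ".VolumeIcon.icns")
       || PySem.Str.startswith c "._")) from funext isSkippable_eq]
  split_ifs with h1 h2 h3 h4 h5 <;> symm <;>
    simp only [List.any_eq_true, List.any_eq_false, Bool.or_eq_true, not_or] at *
  · obtain ⟨x, hx, hp⟩ := h1; exact ⟨x, hx, by tauto⟩
  · obtain ⟨x, hx, hp⟩ := h2; exact ⟨x, hx, by tauto⟩
  · obtain ⟨x, hx, hp⟩ := h3; exact ⟨x, hx, by tauto⟩
  · obtain ⟨x, hx, hp⟩ := h4; exact ⟨x, hx, by tauto⟩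
  · obtain ⟨x, hx, hp⟩ := h5; exact ⟨x, hx, by tauto⟩
  · push_neg at h1 h2 h3 h4 h5
    intro x hx
    have c1 := h1 x hx; have c2 := h2 x hx; have c3 := h3 x hx
    have c4 := h4 x hx; have c5 := h5 x hx
    tauto
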